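-- pv_equiv track=rewrite | github.com/royalrew/sintari-relations | agents/plan_interventions/main.py | derive_metrics
-- ===== SOURCE A (Python) =====
-- from typing import Dict, List, Any, Tuple
--
-- DEFAULT_SUCCESS = [
--     "Färre eskalationer per vecka",
--     "Högre upplevd förståelse (självskattning)",
--     "Ökad följsamhet till överenskommelser"
-- ]
--
-- def derive_metrics(insights: Dict[str, Any]) -> List[str]:
--     metrics = list(DEFAULT_SUCCESS)
--     risks = [r.lower() for r in insights.get("risks", [])] if insights else []
--     if any("defensiv" in r for r in risks):
--         metrics.append("Minskad defensiv respons vid feedback")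
--     if any("tillit" in r for r in risks):
--         metrics.append("Färre brutna mikrolöften per vecka")
--     strengths = [s.lower() for s in insights.get("strengths", [])] if insights else []
--     if any("empati" in s for s in strengths):
--         metrics.append("Ökad validering uttryckt (antal/vecka)")
--     # unika + bevara ordning
--     seen, uniq = set(), []
--     for m in metrics:
--         if m not in seen:
--             seen.add(m); uniq.append(m)
--     return uniq
-- ===== SOURCE B (Python) =====
-- from typing import Dict, List, Any
--
-- DEFAULT_SUCCESS = [
--     "Färre eskalationer per vecka",
--     "Högre upplevd förståelse (självskattning)",
--     "Ökad följsamhet till överenskommelser"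
-- ]
--
-- FIELD_KEYWORDS = {"risks": ["defensiv", "tillit"], "strengths": ["empati"]}
--
-- KEYWORD_METRICS = [
--     ("defensiv", "Minskad defensiv respons vid feedback"),
--     ("tillit", "Färre brutna mikrolöften per vecka"),
--     ("empati", "Ökad validering uttryckt (antal/vecka)"),
-- ]
--
-- def derive_metrics(insights):
--     # One pass over the insight entries, collecting the set of matched keywords,
--     # then map the matched keywords to their metrics in a fixed order.
--     matched = set()
--     for field, values in (insights.items() if insights else []):
--         for kw in FIELD_KEYWORDS.get(field, []):
--             if any(kw in v.lower() for v in values):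
--                 matched.add(kw)
--     return DEFAULT_SUCCESS + [m for kw, m in KEYWORD_METRICS if kw in matched]
-- ===== Notes on version B (the rewrite author's own statement) =====
-- stated objective: alternative
-- what changed: Inverts the iteration: instead of per-field dict lookups with three unrolled keyword ifs and a seen-set dedup loop, B makes one pass over the insight entries, collecting matched keywords into a set via a field->keywords table, and then maps matched keywords to metrics through a keyword->metric table; the dedup pass disappears.
import Mathlib
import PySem

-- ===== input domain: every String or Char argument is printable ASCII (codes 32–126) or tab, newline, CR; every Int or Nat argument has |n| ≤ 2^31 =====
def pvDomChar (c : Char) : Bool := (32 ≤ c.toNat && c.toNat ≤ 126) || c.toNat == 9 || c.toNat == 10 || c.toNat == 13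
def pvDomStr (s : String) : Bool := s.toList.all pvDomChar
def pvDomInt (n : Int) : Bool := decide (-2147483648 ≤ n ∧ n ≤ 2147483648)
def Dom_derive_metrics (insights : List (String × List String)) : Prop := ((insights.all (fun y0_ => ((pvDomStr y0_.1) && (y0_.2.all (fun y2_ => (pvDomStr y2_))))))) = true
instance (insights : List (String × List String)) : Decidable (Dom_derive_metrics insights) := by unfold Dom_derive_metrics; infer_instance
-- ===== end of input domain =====

-- B inverts the iteration: one pass over the insight entries collecting matched keywords
-- into a set via a field->keywords table, then a keyword->metric table maps them to the
-- extra metrics; no per-field lookups, no unrolled ifs, no dedup pass (objective: alternative).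

-- ===== PORT A =====
def derive_metrics (insights : List (String × List String)) : List String :=
  let metrics : List String :=
    ["Färre eskalationer per vecka",
     "Högre upplevd förståelse (självskattning)",
     "Ökad följsamhet till överenskommelser"]
  let risks : List String :=
    if insights.isEmpty then []
    else ((PySem.Dict.mk insights).getD "risks" []).map PySem.Str.lower
  let metrics :=
    if risks.any (fun r => PySem.Str.isIn "defensiv" r) then
      metrics ++ ["Minskad defensiv respons vid feedback"] else metrics
  let metrics :=
    if risks.any (fun r => PySem.Str.isIn "tillit" r) then
      metrics ++ ["Färre brutna mikrolöften per vecka"] else metrics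
  let strengths : List String :=
    if insights.isEmpty then []
    else ((PySem.Dict.mk insights).getD "strengths" []).map PySem.Str.lower
  let metrics :=
    if strengths.any (fun s => PySem.Str.isIn "empati" s) then
      metrics ++ ["Ökad validering uttryckt (antal/vecka)"] else metrics
  -- seen-set + uniq-list dedup loop
  (metrics.foldl
    (fun (st : PySem.Set String × List String) m =>
      if st.1.contains m then st else (st.1.add m, st.2 ++ [m]))
    (PySem.Set.empty, [])).2

-- ===== PORT B =====
def pvFieldKeywords : PySem.Dict String (List String) :=
  PySem.Dict.mk [("risks", ["defensiv", "tillit"]), ("strengths", ["empati"])]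

def pvKeywordMetrics : List (String × String) :=
  [("defensiv", "Minskad defensiv respons vid feedback"),
   ("tillit", "Färre brutna mikrolöften per vecka"),
   ("empati", "Ökad validering uttryckt (antal/vecka)")]

def derive_metrics_alt (insights : List (String × List String)) : List String :=
  let matched : PySem.Set String :=
    (if insights.isEmpty then [] else insights).foldl
      (fun matched item =>
        (pvFieldKeywords.getD item.1 []).foldl
          (fun matched kw =>
            if item.2.any (fun v => PySem.Str.isIn kw (PySem.Str.lower v)) then
              matched.add kw
            else matched)
          matched)
      PySem.Set.empty
  ["Färre eskalationer per vecka",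
   "Högre upplevd förståelse (självskattning)",
   "Ökad följsamhet till överenskommelser"] ++
  pvKeywordMetrics.filterMap (fun p =>
    if matched.contains p.1 then some p.2 else none)

-- ===== PRECONDITION & SPEC =====
-- Pre_ excludes association lists with duplicate keys: a Python dict cannot carry duplicate
-- keys at all, so every input A actually accepts is admitted; on duplicate-key lists A's
-- first-match lookup vs B's full scan is an artefact of the encoding, not of the programs.
def Pre_derive_metrics (insights : List (String × List String)) : Prop :=
  (insights.map Prod.fst).Nodup
instance (insights : List (String × List String)) : Decidable (Pre_derive_metrics insights) := by unfold Pre_derive_metrics; infer_instance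

def pvWitness_derive_metrics : (List (String × List String)) :=
  [("risks", ["lite defensivt", "ok"]), ("strengths", ["Empatisk"])]

def Spec_derive_metrics (insights : List (String × List String)) (out : List String) : Prop := out = derive_metrics_alt insights
instance (insights : List (String × List String)) (out : List String) : Decidable (Spec_derive_metrics insights out) := by unfold Spec_derive_metrics; infer_instance

-- ===== CLAIM (what is proved, stated in full; the proofs are below) =====
def Claim_equal_derive_metrics : Prop := ∀ (insights : List (String × List String)), Dom_derive_metrics insights → Pre_derive_metrics insights → Spec_derive_metrics insights (derive_metrics insights)

-- ===== LEMMAS AND PROOFS =====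

-- whether keyword kw matches some value of the entry
def pvHit (kw : String) (vals : List String) : Bool :=
  vals.any (fun v => PySem.Str.isIn kw (PySem.Str.lower v))

theorem inner_contains (vals kws : List String) (m : PySem.Set String) (kw : String) :
  (kws.foldl (fun matched k =>
      if vals.any (fun v => PySem.Str.isIn k (PySem.Str.lower v)) then PySem.Set.add matched k
      else matched) m).contains kw
  = (m.contains kw || (kws.contains kw && pvHit kw vals)) := by
  induction kws generalizing m with
  | nil => simp
  | cons k ks ih =>
    simp only [List.foldl_cons]
    by_cases hv : (vals.any (fun v => PySem.Str.isIn k (PySem.Str.lower v))) = true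
    · simp only [hv, if_true, ih]
      rw [Bool.eq_iff_iff]
      simp only [Bool.or_eq_true, Bool.and_eq_true, PySem.Set.contains_iff,
        PySem.Set.mem_add, List.contains_eq_mem, decide_eq_true_eq, List.mem_cons]
      by_cases hkk : kw = k
      · subst hkk
        have : pvHit kw vals = true := hv
        simp [this]
      · simp [hkk]
    · simp only [Bool.not_eq_true] at hv
      simp only [hv, Bool.false_eq_true, if_false, ih]
      rw [Bool.eq_iff_iff]
      simp only [Bool.or_eq_true, Bool.and_eq_true, PySem.Set.contains_iff,
        List.contains_eq_mem, decide_eq_true_eq, List.mem_cons]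
      by_cases hkk : kw = k
      · subst hkk
        have : pvHit kw vals = false := hv
        simp [this]
      · simp [hkk]

theorem hk_def (k : String) : (pvFieldKeywords.getD k []).contains "defensiv" = (k == "risks") := by
  by_cases h : k = "risks"
  · subst h; decide
  · by_cases h2 : k = "strengths"
    · subst h2; decide
    · simp [pvFieldKeywords, PySem.Dict.getD_eq_get?_getD, PySem.Dict.get?, beq_iff_eq, Ne.symm h, Ne.symm h2, h]

theorem hk_til (k : String) : (pvFieldKeywords.getD k []).contains "tillit" = (k == "risks") := by
  by_cases h : k = "risks"
  · subst h; decide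
  · by_cases h2 : k = "strengths"
    · subst h2; decide
    · simp [pvFieldKeywords, PySem.Dict.getD_eq_get?_getD, PySem.Dict.get?, beq_iff_eq, Ne.symm h, Ne.symm h2, h]

theorem hk_emp (k : String) : (pvFieldKeywords.getD k []).contains "empati" = (k == "strengths") := by
  by_cases h : k = "risks"
  · subst h; decide
  · by_cases h2 : k = "strengths"
    · subst h2; decide
    · simp [pvFieldKeywords, PySem.Dict.getD_eq_get?_getD, PySem.Dict.get?, beq_iff_eq, Ne.symm h, Ne.symm h2, h2]

theorem derive_metrics_any_eq_getD (l : List (String × List String))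
    (hn : (l.map Prod.fst).Nodup) (key kw : String)
    (hk : ∀ k, (pvFieldKeywords.getD k []).contains kw = (k == key)) :
    l.any (fun it => (pvFieldKeywords.getD it.1 []).contains kw && pvHit kw it.2)
    = ((PySem.Dict.mk l).getD key []).any
        (fun s => PySem.Str.isIn kw (PySem.Str.lower s)) := by
  induction l with
  | nil => simp [PySem.Dict.getD, PySem.Dict.get?]
  | cons p rest ih =>
    simp only [List.map_cons, List.nodup_cons] at hn
    rw [PySem.Dict.getD_eq_get?_getD, PySem.Dict.get?_mk_cons]
    by_cases hpk : p.1 = key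
    · have hb : (p.1 == key) = true := by simp [hpk]
      have hrest : rest.any (fun it => (pvFieldKeywords.getD it.1 []).contains kw && pvHit kw it.2) = false := by
        rw [List.any_eq_false]
        intro it hit
        have : it.1 ≠ key := by
          intro hc
          apply hn.1
          rw [hpk, ← hc]
          exact List.mem_map.mpr ⟨it, hit, rfl⟩
        simp only [hk it.1]
        simp [this]
      simp only [List.any_cons, hrest, Bool.or_false, hk p.1, hb, Bool.true_and]
      simp [pvHit]
    · have hb : (p.1 == key) = false := by simp [hpk]
      simp only [List.any_cons, hk p.1, hb, Bool.false_and, Bool.false_or]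
      rw [ih hn.2, PySem.Dict.getD_eq_get?_getD]
      simp

theorem derive_metrics_fold_contains (l : List (String × List String))
    (m : PySem.Set String) (kw : String) :
    (l.foldl
      (fun matched item =>
        (pvFieldKeywords.getD item.1 []).foldl
          (fun matched kw =>
            if item.2.any (fun v => PySem.Str.isIn kw (PySem.Str.lower v)) then
              PySem.Set.add matched kw
            else matched)
          matched)
      m).contains kw
    = (m.contains kw ||
       l.any (fun it => (pvFieldKeywords.getD it.1 []).contains kw && pvHit kw it.2)) := by
  induction l generalizing m with
  | nil => simp
  | cons it rest ih =>
    simp only [List.foldl_cons, ih, inner_contains, List.any_cons]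
    cases m.contains kw <;> simp

-- ===== VERDICT (by name: the statement is the Claim_ definition above) =====
theorem derive_metrics_spec : Claim_equal_derive_metrics := by
  intro insights _ hpre
  unfold Spec_derive_metrics derive_metrics derive_metrics_alt
  cases h : insights.isEmpty
  · simp only [Bool.false_eq_true, if_false]
    simp only [List.any_map, Function.comp_def]
    simp only [pvKeywordMetrics, List.filterMap_cons, List.filterMap_nil]
    rw [derive_metrics_fold_contains, derive_metrics_fold_contains, derive_metrics_fold_contains]
    simp only [derive_metrics_any_eq_getD insights hpre "risks" "defensiv" hk_def,
      derive_metrics_any_eq_getD insights hpre "risks" "tillit" hk_til,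
      derive_metrics_any_eq_getD insights hpre "strengths" "empati" hk_emp]
    generalize ((PySem.Dict.mk insights).getD "risks" []).any
        (fun s => PySem.Str.isIn "defensiv" (PySem.Str.lower s)) = b1
    generalize ((PySem.Dict.mk insights).getD "risks" []).any
        (fun s => PySem.Str.isIn "tillit" (PySem.Str.lower s)) = b2
    generalize ((PySem.Dict.mk insights).getD "strengths" []).any
        (fun s => PySem.Str.isIn "empati" (PySem.Str.lower s)) = b3
    cases b1 <;> cases b2 <;> cases b3 <;> decide
  · rw [List.isEmpty_iff] at h
    subst h
    decide
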